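-- pv_equiv track=rewrite | github.com/amberchen14/Fetch_Rewards_OA | compare.py | paragraph_to_list
-- ===== SOURCE A (Python) =====
-- def paragraph_to_list(para):
--     '''
--     1. Removes punctuations. For example, "don't" ==> "dont"
--     2. Lower the capital.
--     3. Split the words with space.
--     For example,
--     (ex. "I don't like cake." ==> ["i", "dont", "like", "cake"]
--     '''
--     new_string=''
--     pos = 0
--     while pos <len(para):
--         if para[pos].isalpha():
--             new_string+=para[pos].lower()
--         #elif para[pos]=='.':
--         #    s_out.append(new_string)
--         #    l_out.append(new_string.split(" "))
--         #    new_string=''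
--         #    pos+=1
--         #elif para[pos]=="'":
--         #    new_string+=" "
--         elif para[pos]==" ":
--             new_string+=para[pos]
--         pos+=1
--     out=new_string.split(" ")
--     return out
-- ===== SOURCE B (Python) =====
-- def paragraph_to_list(para):
--     return [''.join(c.lower() for c in w if c.isalpha()) for w in para.split(" ")]
-- ===== Notes on version B (the rewrite author's own statement) =====
-- stated objective: faster
-- what changed: B splits the paragraph on single spaces first and then cleans each word (drop non-alpha, lowercase) via join of a comprehension, instead of A's char-by-char while-loop that grows one string by repeated += and splits at the end.
import Mathlib
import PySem

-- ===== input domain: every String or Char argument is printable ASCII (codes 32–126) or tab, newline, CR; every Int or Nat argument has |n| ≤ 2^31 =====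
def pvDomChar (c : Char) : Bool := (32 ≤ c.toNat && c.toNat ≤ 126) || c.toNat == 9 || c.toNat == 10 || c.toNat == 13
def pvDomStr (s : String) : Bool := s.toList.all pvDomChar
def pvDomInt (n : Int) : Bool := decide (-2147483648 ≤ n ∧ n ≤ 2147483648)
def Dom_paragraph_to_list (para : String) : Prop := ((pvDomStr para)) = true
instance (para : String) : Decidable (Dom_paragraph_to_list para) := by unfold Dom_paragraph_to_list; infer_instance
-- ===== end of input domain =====

-- B replaces A's char-by-char while-loop (filter chars into one string, split at the end)
-- by split-on-space first, then clean each word; measured faster (A's += concatenation is quadratic).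

-- ===== PORT A =====
-- while loop over positions, accumulating new_string; then new_string.split(" ")
def paragraph_to_list (para : String) : List String :=
  let new_string : List Char := para.toList.foldl
    (fun acc c =>
      if PySem.Chars.isalpha c then acc ++ [PySem.Chars.lowerChar c]
      else if c = ' ' then acc ++ [c]
      else acc) []
  (PySem.Chars.splitOn new_string [' ']).map String.mk

-- ===== PORT B =====
-- ''.join(c.lower() for c in w if c.isalpha())
def pvCleanWord (w : List Char) : List Char :=
  w.filterMap (fun c => if PySem.Chars.isalpha c then some (PySem.Chars.lowerChar c) else none)

def paragraph_to_list_alt (para : String) : List String :=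
  (PySem.Chars.splitOn para.toList [' ']).map (fun w => String.mk (pvCleanWord w))

-- ===== PRECONDITION & SPEC =====
def Spec_paragraph_to_list (para : String) (out : List String) : Prop := out = paragraph_to_list_alt para
instance (para : String) (out : List String) : Decidable (Spec_paragraph_to_list para out) := by unfold Spec_paragraph_to_list; infer_instance

-- ===== CLAIM (what is proved, stated in full; the proofs are below) =====
def Claim_equal_paragraph_to_list : Prop := ∀ (para : String), Dom_paragraph_to_list para → Spec_paragraph_to_list para (paragraph_to_list para)

-- ===== LEMMAS AND PROOFS =====

-- A's character filter, as a filterMap function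
def pvFilterA (c : Char) : Option Char :=
  if PySem.Chars.isalpha c then some (PySem.Chars.lowerChar c)
  else if c = ' ' then some c else none

-- B's per-character cleaner, as a filterMap function
def pvFilterB (c : Char) : Option Char :=
  if PySem.Chars.isalpha c then some (PySem.Chars.lowerChar c) else none

-- straight-line model of PySem.Chars.splitOn on the single-char separator ' '
def pvSplitSp : List Char → List Char → List (List Char)
  | [], cur => [cur.reverse]
  | c :: rest, cur =>
      if c = ' ' then cur.reverse :: pvSplitSp rest []
      else pvSplitSp rest (c :: cur)

lemma pvFoldA_eq_filterMap (l : List Char) (acc : List Char) :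
    l.foldl (fun acc c =>
      if PySem.Chars.isalpha c then acc ++ [PySem.Chars.lowerChar c]
      else if c = ' ' then acc ++ [c]
      else acc) acc = acc ++ l.filterMap pvFilterA := by
  induction l generalizing acc with
  | nil => simp
  | cons c rest ih =>
      simp only [List.foldl_cons, List.filterMap_cons, pvFilterA]
      split_ifs <;> simp [ih, pvFilterA]

lemma pvGo_eq (l : List Char) (cur : List Char) (acc : List (List Char)) (fuel : Nat)
    (h : l.length < fuel) :
    PySem.Chars.splitOn.go [' '] fuel l cur acc = acc.reverse ++ pvSplitSp l cur := by
  induction l generalizing cur acc fuel with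
  | nil =>
      cases fuel with
      | zero => omega
      | succ n => simp [PySem.Chars.splitOn.go, pvSplitSp]
  | cons c rest ih =>
      cases fuel with
      | zero => omega
      | succ n =>
        rw [PySem.Chars.splitOn.go]
        by_cases hc : c = ' '
        · subst hc
          have hpre : List.isPrefixOf [' '] (' ' :: rest) = true := by
            simp [List.isPrefixOf]
          simp only [hpre, if_pos, List.length_cons, List.drop_succ_cons, List.length_nil,
            List.drop_zero]
          rw [ih _ _ _ (by simpa using Nat.lt_of_succ_lt_succ h)]
          simp [pvSplitSp]
        · have hpre : List.isPrefixOf [' '] (c :: rest) = false := by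
            simp [List.isPrefixOf]; exact fun hh => absurd hh.symm hc
          simp only [hpre, Bool.false_eq_true, if_false]
          rw [ih _ _ _ (by simpa using Nat.lt_of_succ_lt_succ h)]
          simp [pvSplitSp, hc]

lemma pvSplitOn_eq (l : List Char) :
    PySem.Chars.splitOn l [' '] = pvSplitSp l [] := by
  unfold PySem.Chars.splitOn
  rw [pvGo_eq l [] [] (l.length + 1) (by omega)]
  simp

lemma pvLowerChar_ne_space (c : Char) (h : PySem.Chars.isalpha c = true) :
    PySem.Chars.lowerChar c ≠ ' ' := by
  simp only [PySem.Chars.isalpha, PySem.Chars.isupper, PySem.Chars.islower,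
    PySem.Chars.lowerChar, Bool.or_eq_true, Bool.and_eq_true, decide_eq_true_eq,
    Char.le_def] at h ⊢
  rcases h with ⟨h1, h2⟩ | ⟨h1, h2⟩
  · have hb : 65 ≤ c.toNat ∧ c.toNat ≤ 90 :=
      ⟨UInt32.le_iff_toNat_le.mp h1, UInt32.le_iff_toNat_le.mp h2⟩
    rw [if_pos ⟨h1, h2⟩]
    intro hc
    have ht : (Char.ofNat (c.toNat + 32)).toNat = (' ' : Char).toNat := by rw [hc]
    rw [Char.toNat_ofNat] at ht
    have hvalid : (c.toNat + 32).isValidChar := by left; omega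
    rw [if_pos hvalid] at ht
    have hsp : (' ' : Char).toNat = 32 := by decide
    omega
  · have hb : 97 ≤ c.toNat ∧ c.toNat ≤ 122 := by
      have hx := UInt32.le_iff_toNat_le.mp h1
      have hy := UInt32.le_iff_toNat_le.mp h2
      have ha' : ('a' : Char).val.toNat = 97 := by decide
      have hz' : ('z' : Char).val.toNat = 122 := by decide
      exact ⟨ha' ▸ hx, hz' ▸ hy⟩
    have hnu : ¬ (('A' : Char).val ≤ c.val ∧ c.val ≤ ('Z' : Char).val) := by
      rintro ⟨_, hz⟩
      have := UInt32.le_iff_toNat_le.mp hz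
      have hz' : ('Z' : Char).val.toNat = 90 := by decide
      rw [hz'] at this
      have hvv : c.val.toNat = c.toNat := rfl
      rw [hvv] at this
      omega
    rw [if_neg hnu]
    intro hc
    have : c.toNat = (' ' : Char).toNat := by rw [hc]
    have hsp : (' ' : Char).toNat = 32 := by decide
    omega

lemma pvAlpha_ne_space (c : Char) (h : PySem.Chars.isalpha c = true) : c ≠ ' ' := by
  simp only [PySem.Chars.isalpha, PySem.Chars.isupper, PySem.Chars.islower,
    Bool.or_eq_true, Bool.and_eq_true, decide_eq_true_eq, Char.le_def] at h
  intro hc; subst hc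
  rcases h with ⟨h1, _⟩ | ⟨h1, _⟩ <;> exact absurd h1 (by decide)

lemma pvSplit_filter_comm (l : List Char) (cur : List Char) :
    pvSplitSp (l.filterMap pvFilterA) (cur.filterMap pvFilterB)
      = (pvSplitSp l cur).map (fun w => w.filterMap pvFilterB) := by
  induction l generalizing cur with
  | nil => simp [pvSplitSp, List.filterMap_reverse]
  | cons c rest ih =>
      by_cases ha : PySem.Chars.isalpha c
      · have hfa : pvFilterA c = some (PySem.Chars.lowerChar c) := by simp [pvFilterA, ha]
        have hfb : pvFilterB c = some (PySem.Chars.lowerChar c) := by simp [pvFilterB, ha]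
        rw [List.filterMap_cons, hfa]
        rw [show pvSplitSp (c :: rest) cur = pvSplitSp rest (c :: cur) from by
          simp [pvSplitSp, pvAlpha_ne_space c ha]]
        rw [show pvSplitSp (PySem.Chars.lowerChar c :: rest.filterMap pvFilterA)
              (cur.filterMap pvFilterB)
            = pvSplitSp (rest.filterMap pvFilterA)
              (PySem.Chars.lowerChar c :: cur.filterMap pvFilterB) from by
          simp [pvSplitSp, pvLowerChar_ne_space c ha]]
        have : PySem.Chars.lowerChar c :: cur.filterMap pvFilterB
            = (c :: cur).filterMap pvFilterB := by simp [hfb]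
        rw [this, ih]
      · by_cases hs : c = ' '
        · subst hs
          have hfa : pvFilterA ' ' = some ' ' := by simp [pvFilterA, ha]
          rw [List.filterMap_cons, hfa]
          rw [show pvSplitSp (' ' :: rest.filterMap pvFilterA) (cur.filterMap pvFilterB)
              = (cur.filterMap pvFilterB).reverse :: pvSplitSp (rest.filterMap pvFilterA) [] from by
            simp [pvSplitSp]]
          rw [show pvSplitSp (' ' :: rest) cur = cur.reverse :: pvSplitSp rest [] from by
            simp [pvSplitSp]]
          have := ih ([])
          simp only [List.filterMap_nil] at this
          simp [this, List.filterMap_reverse]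
        · have hfa : pvFilterA c = none := by simp [pvFilterA, ha, hs]
          rw [List.filterMap_cons, hfa]
          rw [show pvSplitSp (c :: rest) cur = pvSplitSp rest (c :: cur) from by
            simp [pvSplitSp, hs]]
          have : (c :: cur).filterMap pvFilterB = cur.filterMap pvFilterB := by
            simp [pvFilterB, ha]
          rw [← this, ih]

-- ===== VERDICT (by name: the statement is the Claim_ definition above) =====
theorem paragraph_to_list_spec : Claim_equal_paragraph_to_list := by
  intro para _hdom
  unfold Spec_paragraph_to_list paragraph_to_list paragraph_to_list_alt
  rw [pvFoldA_eq_filterMap]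
  simp only [List.nil_append]
  rw [pvSplitOn_eq, pvSplitOn_eq]
  rw [show (List.filterMap pvFilterA para.toList) = para.toList.filterMap pvFilterA from rfl]
  have := pvSplit_filter_comm para.toList []
  simp only [List.filterMap_nil] at this
  rw [this]
  simp [pvCleanWord, pvFilterB, List.map_map, Function.comp]
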